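-- pv_equiv track=rewrite | github.com/Marianoantar/chinchonPoo | evaluador.py | hay_escalera
-- ===== SOURCE A (Python) =====
-- from typing import List, Tuple, Dict, Union, Optional, Any
--
-- def hay_escalera(palos: Dict[str, List[int]]) -> Tuple[bool, Dict[str, List[List[int]]], bool]:
--     """
--     Comprueba si hay escalera(s) por palo.
--     Devuelve (es_escalera, escaleras_por_palo, chinchon_flag)
--     """
--     chinchon = False
--     es_escalera = False
--     escaleras: Dict[str, List[List[int]]] = {}
--     for palo, numeros in palos.items():
--         lista_de_numeros = sorted(numeros)
--         if len(lista_de_numeros) < 3: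
--             continue
--         secuencias: List[List[int]] = []
--         temp: List[int] = [lista_de_numeros[0]]
--         for i in range(1, len(lista_de_numeros)):
--             if lista_de_numeros[i] == lista_de_numeros[i - 1] + 1:
--                 temp.append(lista_de_numeros[i])
--             else:
--                 if len(temp) >= 3:
--                     secuencias.append(temp)
--                 temp = [lista_de_numeros[i]]
--         if len(temp) >= 3:
--             secuencias.append(temp)
--         if any(len(s) == 7 for s in secuencias):
--             chinchon = True
--         if secuencias:
--             escaleras[palo] = secuencias
--             es_escalera = True
--     return es_escalera, escaleras, chinchon
-- ===== SOURCE B (Python) =====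
-- def hay_escalera(palos):
--     """
--     Comprueba si hay escalera(s) por palo.
--     Devuelve (es_escalera, escaleras_por_palo, chinchon_flag)
--     Re-implementation: runs are built back-to-front (right fold) by prepending
--     each card to the first run of the already-chunked suffix; no temp/flush pass.
--     """
--     chinchon = False
--     es_escalera = False
--     escaleras = {}
--     for palo, numeros in palos.items():
--         s = sorted(numeros)
--         if len(s) < 3:
--             continue
--         runs = [g for g in _runs(s) if len(g) >= 3]
--         if any(len(g) == 7 for g in runs):
--             chinchon = True
--         if runs:
--             escaleras[palo] = runs
--             es_escalera = True
--     return es_escalera, escaleras, chinchon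
--
--
-- def _runs(s):
--     # maximal strictly-consecutive chunks of s, built back-to-front:
--     # walk the sorted list from the right, prepending each value either onto
--     # the first chunk of the suffix (if it continues it) or as a new chunk.
--     chunks = []
--     for x in reversed(s):
--         if chunks and chunks[0][0] == x + 1:
--             chunks = [[x] + chunks[0]] + chunks[1:]
--         else:
--             chunks = [[x]] + chunks
--     return chunks
-- ===== Notes on version B (the rewrite author's own statement) =====
-- stated objective: alternative
-- what changed: The run-finding pass is replaced: instead of A's forward index scan over sorted(numeros) with a temp accumulator that is flushed into secuencias at each break and once after the loop, B walks the sorted list back-to-front, prepending each card onto the first chunk of the already-processed suffix (or opening a new chunk), and then filters the chunks by length >= 3 in a separate pass.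
import Mathlib
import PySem

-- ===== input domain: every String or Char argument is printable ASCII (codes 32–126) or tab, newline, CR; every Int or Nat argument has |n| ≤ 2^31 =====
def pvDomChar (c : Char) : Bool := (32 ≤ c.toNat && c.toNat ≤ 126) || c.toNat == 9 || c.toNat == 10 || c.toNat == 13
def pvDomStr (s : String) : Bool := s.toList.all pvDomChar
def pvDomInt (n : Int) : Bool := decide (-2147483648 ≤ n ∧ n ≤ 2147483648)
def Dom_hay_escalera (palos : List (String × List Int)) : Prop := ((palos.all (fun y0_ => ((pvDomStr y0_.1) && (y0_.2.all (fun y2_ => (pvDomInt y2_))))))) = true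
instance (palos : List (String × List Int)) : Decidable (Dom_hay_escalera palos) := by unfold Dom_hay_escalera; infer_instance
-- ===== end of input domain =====

-- B changes only the run-finding pass: a back-to-front prepend fold instead of A's
-- forward temp-accumulator scan with flushes; same cost (objective: alternative).

-- ===== PORT A =====
def hay_escalera (palos : List (String × List Int)) : Bool × (List (String × List (List Int))) × Bool :=
  let r := palos.foldl
    (fun (acc : Bool × Bool × PySem.Dict String (List (List Int))) pn =>
      let chinchon := acc.1
      let es_escalera := acc.2.1
      let escaleras := acc.2.2
      let lista := PySem.List.sorted pn.2 (fun x => x) false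
      if lista.length < 3 then acc
      else
        let st := (PySem.List.pyRange 1 (lista.length : Int) 1).foldl
          (fun (st : List (List Int) × List Int) i =>
            if PySem.List.pyGetD lista i 0 = PySem.List.pyGetD lista (i - 1) 0 + 1 then
              (st.1, st.2 ++ [PySem.List.pyGetD lista i 0])
            else
              ((if 3 ≤ st.2.length then st.1 ++ [st.2] else st.1),
               [PySem.List.pyGetD lista i 0]))
          (([] : List (List Int)), [PySem.List.pyGetD lista 0 0])
        let secuencias := if 3 ≤ st.2.length then st.1 ++ [st.2] else st.1
        let chinchon := if secuencias.any (fun s => s.length = 7) then true else chinchon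
        if secuencias = [] then (chinchon, es_escalera, escaleras)
        else (chinchon, true, escaleras.insert pn.1 secuencias))
    (false, false, PySem.Dict.empty)
  (r.2.1, r.2.2.items, r.1)

-- ===== PORT B =====
-- _runs: iterate over reversed(s) keeping the chunk list of the suffix (a right fold)
def pvRunsB (s : List Int) : List (List Int) :=
  s.foldr
    (fun x chunks =>
      match chunks with
      | g :: tl => if g.head? = some (x + 1) then (x :: g) :: tl else [x] :: g :: tl
      | [] => [[x]])
    []

def hay_escalera_alt (palos : List (String × List Int)) : Bool × (List (String × List (List Int))) × Bool :=
  let r := palos.foldl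
    (fun (acc : Bool × Bool × PySem.Dict String (List (List Int))) pn =>
      let chinchon := acc.1
      let es_escalera := acc.2.1
      let escaleras := acc.2.2
      let s := PySem.List.sorted pn.2 (fun x => x) false
      if s.length < 3 then acc
      else
        let runs := (pvRunsB s).filter (fun g => 3 ≤ g.length)
        let chinchon := if runs.any (fun g => g.length = 7) then true else chinchon
        if runs = [] then (chinchon, es_escalera, escaleras)
        else (chinchon, true, escaleras.insert pn.1 runs))
    (false, false, PySem.Dict.empty)
  (r.2.1, r.2.2.items, r.1)

-- ===== PRECONDITION & SPEC =====
def Spec_hay_escalera (palos : List (String × List Int)) (out : Bool × (List (String × List (List Int))) × Bool) : Prop := out = hay_escalera_alt palos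
instance (palos : List (String × List Int)) (out : Bool × (List (String × List (List Int))) × Bool) : Decidable (Spec_hay_escalera palos out) := by unfold Spec_hay_escalera; infer_instance

-- ===== CLAIM (what is proved, stated in full; the proofs are below) =====
def Claim_equal_hay_escalera : Prop := ∀ (palos : List (String × List Int)), Dom_hay_escalera palos → Spec_hay_escalera palos (hay_escalera palos)

-- ===== LEMMAS AND PROOFS =====

-- A's inner loop step, seen as a function of (previous element, current element).
def pvStepA (st : List (List Int) × List Int) (p c : Int) : List (List Int) × List Int :=
  if c = p + 1 then (st.1, st.2 ++ [c])
  else ((if 3 ≤ st.2.length then st.1 ++ [st.2] else st.1), [c])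

def pvFlush (st : List (List Int) × List Int) : List (List Int) :=
  if 3 ≤ st.2.length then st.1 ++ [st.2] else st.1

-- Each chunk list produced by pvRunsB on a nonempty list starts with the head element.
theorem pvRunsB_head (x : Int) (l : List Int) :
    ∃ g tl, pvRunsB (x :: l) = (x :: g) :: tl := by
  induction l generalizing x with
  | nil => exact ⟨[], [], rfl⟩
  | cons c t ih =>
    obtain ⟨g, tl, hg⟩ := ih c
    by_cases h : c = x + 1
    · refine ⟨c :: g, tl, ?_⟩
      simp [pvRunsB] at hg ⊢
      rw [hg]
      simp [h]
    · refine ⟨[], pvRunsB (c :: t), ?_⟩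
      simp [pvRunsB] at hg ⊢
      rw [hg]
      simp [h]

-- index-based fold over range(k+1, len) with accesses xs[i-1], xs[i] = fold over adjacent pairs of drop k
theorem pvIdxFold {σ : Type} (F : σ → Int → Int → σ) (xs : List Int) :
    ∀ (n k : Nat) (init : σ), xs.length - k = n →
      (PySem.List.pyRange ((k : Int) + 1) (xs.length : Int) 1).foldl
          (fun st i => F st (PySem.List.pyGetD xs (i - 1) 0) (PySem.List.pyGetD xs i 0)) init
        = ((xs.drop k).zip (xs.drop (k + 1))).foldl (fun st p => F st p.1 p.2) init := by
  intro n
  induction n with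
  | zero =>
    intro k init hn
    have hle : (xs.length : Int) ≤ (k : Int) + 1 := by omega
    rw [PySem.List.pyRange_one_eq_nil hle]
    rw [List.drop_eq_nil_of_le (by omega)]
    simp
  | succ n ih =>
    intro k init hn
    by_cases hk : xs.length ≤ k + 1
    · have hle : (xs.length : Int) ≤ (k : Int) + 1 := by omega
      rw [PySem.List.pyRange_one_eq_nil hle]
      rw [show xs.drop (k + 1) = [] from List.drop_eq_nil_of_le (by omega)]
      simp
    · have hk1 : k + 1 < xs.length := by omega
      have hk0 : k < xs.length := by omega
      have hz : (xs.drop k).zip (xs.drop (k + 1))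
          = (xs[k], xs[k + 1]) :: ((xs[k + 1] :: xs.drop (k + 1 + 1)).zip (xs.drop (k + 1 + 1))) := by
        rw [List.drop_eq_getElem_cons hk0, List.drop_eq_getElem_cons hk1, List.zip_cons_cons]
      have hlt : (k : Int) + 1 < (xs.length : Int) := by omega
      rw [PySem.List.pyRange_one_cons hlt, hz]
      simp only [List.foldl_cons]
      rw [show ((k : Int) + 1 - 1) = ((k : Nat) : Int) from by ring,
        show ((k : Int) + 1) = ((k + 1 : Nat) : Int) from by push_cast; ring,
        PySem.List.pyGetD_natCast, PySem.List.pyGetD_natCast,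
        List.getD_eq_getElem _ _ hk0, List.getD_eq_getElem _ _ hk1,
        ← List.drop_eq_getElem_cons hk1]
      exact ih (k + 1) (F init xs[k] xs[k + 1]) (by omega)

-- the forward scan with flush equals filter(len≥3) of the back-to-front chunks
theorem pvScanA (l : List Int) :
    ∀ (x : Int) (secs : List (List Int)) (temp : List Int) (g : List Int) (tl : List (List Int)),
      pvRunsB (x :: l) = (x :: g) :: tl →
      pvFlush (((x :: l).zip l).foldl (fun st p => pvStepA st p.1 p.2) (secs, temp))
        = secs ++ ((temp ++ g) :: tl).filter (fun t => 3 ≤ t.length) := by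
  induction l with
  | nil =>
    intro x secs temp g tl h
    have hr : pvRunsB [x] = [[x]] := rfl
    rw [hr] at h
    injection h with h1 h2
    injection h1 with _ h3
    subst h3
    subst h2
    simp only [List.zip_nil_right, List.foldl_nil, pvFlush, List.append_nil,
      List.filter_cons, List.filter_nil]
    by_cases h3 : 3 ≤ temp.length <;> simp [h3]
  | cons c t ih =>
    intro x secs temp g tl h
    obtain ⟨g', tl', hct⟩ := pvRunsB_head c t
    have hx : pvRunsB (x :: c :: t) = (match pvRunsB (c :: t) with
      | gg :: tll => if gg.head? = some (x + 1) then (x :: gg) :: tll else [x] :: gg :: tll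
      | [] => [[x]]) := rfl
    rw [hct] at hx
    simp only [List.zip_cons_cons, List.foldl_cons]
    by_cases hc : c = x + 1
    · have hx2 : pvRunsB (x :: c :: t) = (x :: c :: g') :: tl' := by
        rw [hx]; simp [hc]
      rw [hx2] at h
      injection h with h1 h2
      injection h1 with _ h3
      subst h3
      subst h2
      have step : pvStepA (secs, temp) x c = (secs, temp ++ [c]) := by
        simp [pvStepA, hc]
      rw [step, ih c secs (temp ++ [c]) g' tl' hct]
      simp
    · have hx2 : pvRunsB (x :: c :: t) = [x] :: (c :: g') :: tl' := by
        rw [hx]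
        simp [hc]
      rw [hx2] at h
      injection h with h1 h2
      injection h1 with _ h3
      subst h3
      subst h2
      have step : pvStepA (secs, temp) x c
          = ((if 3 ≤ temp.length then secs ++ [temp] else secs), [c]) := by
        simp [pvStepA, hc]
      rw [step, ih c _ [c] g' tl' hct]
      simp only [List.append_nil, List.cons_append, List.nil_append, List.filter_cons]
      by_cases h3 : 3 ≤ temp.length <;> simp [h3]

-- per suit: A's secuencias = B's runs (for any nonempty sorted list)
theorem pvSuit (s : List Int) (hs : s ≠ []) :
    (let st := (PySem.List.pyRange 1 (s.length : Int) 1).foldl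
        (fun (st : List (List Int) × List Int) i =>
          if PySem.List.pyGetD s i 0 = PySem.List.pyGetD s (i - 1) 0 + 1 then
            (st.1, st.2 ++ [PySem.List.pyGetD s i 0])
          else
            ((if 3 ≤ st.2.length then st.1 ++ [st.2] else st.1),
             [PySem.List.pyGetD s i 0]))
        (([] : List (List Int)), [PySem.List.pyGetD s 0 0])
      if 3 ≤ st.2.length then st.1 ++ [st.2] else st.1)
      = (pvRunsB s).filter (fun g => 3 ≤ g.length) := by
  obtain ⟨x, l, rfl⟩ := List.exists_cons_of_ne_nil hs
  obtain ⟨g, tl, hg⟩ := pvRunsB_head x l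
  have hidx := pvIdxFold (fun st p c => pvStepA st p c) (x :: l) ((x :: l).length) 0
    (([] : List (List Int)), [PySem.List.pyGetD (x :: l) 0 0]) rfl
  simp only [Nat.cast_zero, zero_add, List.drop_zero, List.drop_one, List.tail_cons] at hidx
  have hstep : (fun (st : List (List Int) × List Int) i =>
      if PySem.List.pyGetD (x :: l) i 0 = PySem.List.pyGetD (x :: l) (i - 1) 0 + 1 then
        (st.1, st.2 ++ [PySem.List.pyGetD (x :: l) i 0])
      else
        ((if 3 ≤ st.2.length then st.1 ++ [st.2] else st.1),
         [PySem.List.pyGetD (x :: l) i 0]))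
      = (fun (st : List (List Int) × List Int) i =>
          pvStepA st (PySem.List.pyGetD (x :: l) (i - 1) 0) (PySem.List.pyGetD (x :: l) i 0)) := by
    funext st i
    simp [pvStepA]
  show pvFlush _ = _
  rw [hstep, hidx]
  have h0 : PySem.List.pyGetD (x :: l) 0 0 = x := PySem.List.pyGetD_zero_cons x l 0
  rw [h0, pvScanA l x [] [x] g tl hg, hg]
  simp

-- the two outer loop bodies agree
theorem pvStepEq :
    (fun (acc : Bool × Bool × PySem.Dict String (List (List Int))) (pn : String × List Int) =>
      let chinchon := acc.1
      let es_escalera := acc.2.1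
      let escaleras := acc.2.2
      let lista := PySem.List.sorted pn.2 (fun x => x) false
      if lista.length < 3 then acc
      else
        let st := (PySem.List.pyRange 1 (lista.length : Int) 1).foldl
          (fun (st : List (List Int) × List Int) i =>
            if PySem.List.pyGetD lista i 0 = PySem.List.pyGetD lista (i - 1) 0 + 1 then
              (st.1, st.2 ++ [PySem.List.pyGetD lista i 0])
            else
              ((if 3 ≤ st.2.length then st.1 ++ [st.2] else st.1),
               [PySem.List.pyGetD lista i 0]))
          (([] : List (List Int)), [PySem.List.pyGetD lista 0 0])
        let secuencias := if 3 ≤ st.2.length then st.1 ++ [st.2] else st.1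
        let chinchon := if secuencias.any (fun s => s.length = 7) then true else chinchon
        if secuencias = [] then (chinchon, es_escalera, escaleras)
        else (chinchon, true, escaleras.insert pn.1 secuencias))
    = (fun (acc : Bool × Bool × PySem.Dict String (List (List Int))) (pn : String × List Int) =>
      let chinchon := acc.1
      let es_escalera := acc.2.1
      let escaleras := acc.2.2
      let s := PySem.List.sorted pn.2 (fun x => x) false
      if s.length < 3 then acc
      else
        let runs := (pvRunsB s).filter (fun g => 3 ≤ g.length)
        let chinchon := if runs.any (fun g => g.length = 7) then true else chinchon
        if runs = [] then (chinchon, es_escalera, escaleras)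
        else (chinchon, true, escaleras.insert pn.1 runs)) := by
  funext acc pn
  by_cases hlen : (PySem.List.sorted pn.2 (fun x => x) false).length < 3
  · simp only [if_pos hlen]
  · have hne : PySem.List.sorted pn.2 (fun x => x) false ≠ [] := by
      intro h
      rw [h] at hlen
      simp at hlen
    simp only [if_neg hlen]
    exact congrArg
      (fun r : List (List Int) =>
        if r = [] then ((if r.any (fun s => s.length = 7) then true else acc.1), acc.2.1, acc.2.2)
        else ((if r.any (fun s => s.length = 7) then true else acc.1), true,
          acc.2.2.insert pn.1 r))
      (pvSuit (PySem.List.sorted pn.2 (fun x => x) false) hne)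

-- ===== VERDICT (by name: the statement is the Claim_ definition above) =====
theorem hay_escalera_spec : Claim_equal_hay_escalera := by
  intro palos _
  show hay_escalera palos = hay_escalera_alt palos
  unfold hay_escalera hay_escalera_alt
  rw [pvStepEq]
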